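-- pv_equiv track=rewrite | github.com/Devendrajjw/PythonConcepts | tricky/chunkEven.py | even_number_in_chunks
-- ===== SOURCE A (Python) =====
-- def even_number_in_chunks(num, list_size=3):
--     even_list = []
--     for n1 in num:
--         if n1 % 2 == 0:
--             even_list.append(n1)
--             if len(even_list) == list_size:
--                 yield even_list
--                 even_list = []
--     if even_list:
--         yield even_list
-- ===== SOURCE B (Python) =====
-- def even_number_in_chunks(num, list_size=3):
--     evens = [n for n in num if n % 2 == 0]
--     for i in range(0, len(evens), list_size):
--         yield evens[i:i + list_size]
-- ===== Notes on version B (the rewrite author's own statement) =====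
-- stated objective: simpler
-- what changed: A interleaves the even filter with a counter-and-reset accumulator in one pass; B first collects the evens, then slices them with a stepped range. Pre_ excludes non-positive list_size: there A's chunk-full check never fires so it returns all evens as one list, while B's range(0, len, step) raises ValueError for step 0 and is empty for negative steps - a corner no caller would specify.
-- outside the precondition, e.g. on even_number_in_chunks([2, 4], 0): A returns [[2, 4]], B raises ValueError; on even_number_in_chunks([2, 4], -1): A returns [[2, 4]], B returns []
import Mathlib
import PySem

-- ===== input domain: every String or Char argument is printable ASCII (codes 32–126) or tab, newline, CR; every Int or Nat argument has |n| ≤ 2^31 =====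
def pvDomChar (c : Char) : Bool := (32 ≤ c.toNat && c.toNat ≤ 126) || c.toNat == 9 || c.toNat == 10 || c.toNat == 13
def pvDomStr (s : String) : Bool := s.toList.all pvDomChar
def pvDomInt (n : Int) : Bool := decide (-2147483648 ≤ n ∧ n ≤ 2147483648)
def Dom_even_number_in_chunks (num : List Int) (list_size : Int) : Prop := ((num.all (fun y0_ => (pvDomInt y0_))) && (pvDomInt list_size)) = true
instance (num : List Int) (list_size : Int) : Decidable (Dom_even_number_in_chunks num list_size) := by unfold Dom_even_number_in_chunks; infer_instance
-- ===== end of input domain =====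

-- B replaces A's one-pass counter-and-reset accumulator by filter-then-slice over a stepped range (a simpler decomposition, same cost).

-- ===== PORT A =====
-- one loop iteration of A: append an even element, emit the chunk when it reaches list_size
def stepA (list_size : Int) (s : List Int × List (List Int)) (n1 : Int) : List Int × List (List Int) :=
  if PySem.Int.mod n1 2 == 0 then
    let el := s.1 ++ [n1]
    if (el.length : Int) == list_size then ([], s.2 ++ [el]) else (el, s.2)
  else s

def even_number_in_chunks (num : List Int) (list_size : Int) : List (List Int) :=
  let st := num.foldl (stepA list_size) ([], [])
  if st.1.isEmpty then st.2 else st.2 ++ [st.1]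

-- ===== PORT B =====
-- Source B: collect the evens, then 'for i in range(0, len(evens), list_size): yield evens[i:i+list_size]'
def even_number_in_chunks_alt (num : List Int) (list_size : Int) : List (List Int) :=
  let evens := num.filter (fun n => PySem.Int.mod n 2 == 0)
  (PySem.List.pyRange 0 (evens.length : Int) list_size).map
    (fun i => PySem.List.slice evens (some i) (some (i + list_size)))

-- ===== PRECONDITION & SPEC =====
-- Pre_ excludes non-positive list_size: there A's chunk-full check never fires so it returns all
-- evens as one list, while B's range(0, len, step) raises ValueError for step 0 and is empty for
-- negative steps — a corner no caller would specify.
def Pre_even_number_in_chunks (num : List Int) (list_size : Int) : Prop := 0 < list_size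
instance (num : List Int) (list_size : Int) : Decidable (Pre_even_number_in_chunks num list_size) := by unfold Pre_even_number_in_chunks; infer_instance
def pvWitness_even_number_in_chunks : List Int × Int := ([1, 2, 3, 4, 5, 6, 8], 2)

def Spec_even_number_in_chunks (num : List Int) (list_size : Int) (out : List (List Int)) : Prop := out = even_number_in_chunks_alt num list_size
instance (num : List Int) (list_size : Int) (out : List (List Int)) : Decidable (Spec_even_number_in_chunks num list_size out) := by unfold Spec_even_number_in_chunks; infer_instance

-- ===== CLAIM (what is proved, stated in full; the proofs are below) =====
def Claim_equal_even_number_in_chunks : Prop := ∀ (num : List Int) (list_size : Int), Dom_even_number_in_chunks num list_size → Pre_even_number_in_chunks num list_size → Spec_even_number_in_chunks num list_size (even_number_in_chunks num list_size)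

-- ===== LEMMAS AND PROOFS =====

-- proof-side normal form: chunks of k elements, eaten front to back
def chunkB (k : Nat) : List Int → List (List Int)
  | [] => []
  | x :: xs => (x :: xs.take (k - 1)) :: chunkB k (xs.drop (k - 1))
termination_by l => l.length
decreasing_by simp

-- odd elements are skipped by stepA, so folding over num equals folding over the filtered evens
theorem foldl_stepA_filter (k : Int) (l : List Int) :
    ∀ s : List Int × List (List Int),
      l.foldl (stepA k) s = (l.filter (fun n => PySem.Int.mod n 2 == 0)).foldl (stepA k) s := by
  induction l with
  | nil => intro s; rfl
  | cons x xs ih =>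
    intro s
    rw [List.filter_cons]
    by_cases hx : (PySem.Int.mod x 2 == 0) = true
    · rw [if_pos hx, List.foldl_cons, List.foldl_cons, ih]
    · have hx1 : x % 2 = 1 := by
        have hnd : ¬ (2 ∣ x) := by simpa using hx
        omega
      have hs : stepA k s x = s := by simp [stepA, hx1]
      rw [if_neg (by simp [hx1]), List.foldl_cons, hs, ih]

-- chunkB eats exactly k elements per step
theorem chunkB_eq_take_drop (k : Nat) (hk : 1 ≤ k) (l : List Int) (hl : l ≠ []) :
    chunkB k l = l.take k :: chunkB k (l.drop k) := by
  cases l with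
  | nil => exact absurd rfl hl
  | cons x xs =>
    have h1 : (x :: xs).take k = x :: xs.take (k - 1) := by
      cases k with
      | zero => omega
      | succ m => simp
    have h2 : (x :: xs).drop k = xs.drop (k - 1) := by
      cases k with
      | zero => omega
      | succ m => simp
    rw [chunkB, h1, h2]

-- main loop invariant for positive k: A's fold, finished off, produces the chunks of acc ++ l
theorem loopA (k : Int) (hk : 0 < k) (l : List Int)
    (hl : ∀ n ∈ l, PySem.Int.mod n 2 == 0) :
    ∀ (acc : List Int) (out : List (List Int)), acc.length < k.toNat →
      (let st := l.foldl (stepA k) (acc, out)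
       if st.1.isEmpty then st.2 else st.2 ++ [st.1]) = out ++ chunkB k.toNat (acc ++ l) := by
  induction l with
  | nil =>
    intro acc out hacc
    simp only [List.foldl, List.append_nil]
    by_cases ha : acc = []
    · subst ha; rw [chunkB]; simp
    · rw [chunkB_eq_take_drop _ (by omega) _ ha,
        List.take_of_length_le (by omega), List.drop_eq_nil_of_le (by omega), chunkB]
      simp [ha]
  | cons x xs ih =>
    intro acc out hacc
    have hx2 : 2 ∣ x := by simpa using hl x (by simp)
    have hxs : ∀ n ∈ xs, PySem.Int.mod n 2 == 0 := fun n hn => hl n (by simp [hn])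
    simp only [List.foldl_cons]
    by_cases hfull : acc.length + 1 = k.toNat
    · have hbe : ((acc.length : Int) + 1) = k := by omega
      have hstep : stepA k (acc, out) x = ([], out ++ [acc ++ [x]]) := by
        simp [stepA, hx2, hbe]
      rw [hstep]
      have hrec := ih hxs [] (out ++ [acc ++ [x]]) (by simp only [List.length_nil]; omega)
      simp only [List.nil_append] at hrec
      rw [hrec]
      have hch : chunkB k.toNat (acc ++ x :: xs) = (acc ++ [x]) :: chunkB k.toNat xs := by
        rw [chunkB_eq_take_drop _ (by omega) _ (by simp)]
        have hsplit : acc ++ x :: xs = (acc ++ [x]) ++ xs := by simp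
        have hlen : (acc ++ [x]).length = acc.length + 1 := by simp
        have hkn : k.toNat = (acc ++ [x]).length := by omega
        have h1 : (acc ++ x :: xs).take k.toNat = acc ++ [x] := by
          rw [hsplit, hkn, List.take_left]
        have h2 : (acc ++ x :: xs).drop k.toNat = xs := by
          rw [hsplit, hkn, List.drop_left]
        rw [h1, h2]
      rw [hch]
      simp
    · have hbe : ((acc.length : Int) + 1) ≠ k := by omega
      have hstep : stepA k (acc, out) x = (acc ++ [x], out) := by
        simp [stepA, hx2, hbe]
      rw [hstep, ih hxs (acc ++ [x]) out (by simp only [List.length_append, List.length_cons, List.length_nil]; omega)]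
      have : (acc ++ [x]) ++ xs = acc ++ x :: xs := by simp
      rw [this]

-- range(0, n, k) for positive k and n: peel off 0 and shift the rest down by k
theorem pyRange_zero_pos_cons (k n : Int) (hk : 0 < k) (hn : 0 < n) :
    PySem.List.pyRange 0 n k = 0 :: (PySem.List.pyRange 0 (n - k) k).map (· + k) := by
  rw [PySem.List.pyRange_of_pos _ _ hk, PySem.List.pyRange_of_pos _ _ hk]
  have hdiv : (n - 0 + k - 1) / k = (n - 1) / k + 1 := by
    have := Int.add_mul_ediv_right (n - 1) 1 (by omega : k ≠ 0)
    simp only [one_mul] at this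
    rw [show n - 0 + k - 1 = n - 1 + k by ring, this]
  have hq : 0 ≤ (n - 1) / k := Int.ediv_nonneg (by omega) (by omega)
  have hc1 : (if (0:Int) < n then ((n - 0 + k - 1) / k).toNat else 0) = ((n - 1) / k).toNat + 1 := by
    rw [if_pos hn, hdiv]; omega
  have hc2 : (if (0:Int) < n - k then ((n - k - 0 + k - 1) / k).toNat else 0) = ((n - 1) / k).toNat := by
    by_cases h : (0:Int) < n - k
    · rw [if_pos h, show n - k - 0 + k - 1 = n - 1 by ring]
    · rw [if_neg h]
      have : (n - 1) / k = 0 := Int.ediv_eq_zero_of_lt (by omega) (by omega)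
      omega
  rw [hc1, hc2, List.range_succ_eq_map, List.map_cons, List.map_map, List.map_map]
  refine congrArg₂ _ (by simp) (List.map_congr_left ?_)
  intro j _
  simp [Function.comp]
  ring

-- B's stepped-range slicing equals chunkB, by strong induction on the list length
theorem map_range_slice_eq_chunkB (k : Int) (hk : 0 < k) :
    ∀ (n : Nat) (l : List Int), l.length = n →
      (PySem.List.pyRange 0 (l.length : Int) k).map
        (fun i => PySem.List.slice l (some i) (some (i + k))) = chunkB k.toNat l := by
  intro n
  induction n using Nat.strong_induction_on with
  | _ n ih =>
    intro l hlen
    cases l with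
    | nil => simp [PySem.List.pyRange, show k ≠ 0 by omega, chunkB]
    | cons x xs =>
      have hk1 : 1 ≤ k.toNat := by omega
      have hpos : (0:Int) < ((x :: xs).length : Int) := by
        simp only [List.length_cons]; push_cast; omega
      rw [pyRange_zero_pos_cons k _ hk hpos, List.map_cons, List.map_map,
        chunkB_eq_take_drop k.toNat hk1 (x :: xs) (by simp)]
      refine congrArg₂ _ ?_ ?_
      · rw [zero_add, PySem.List.slice_zero_start, PySem.List.slice_to _ (by omega)]
      · have hlt : ((x :: xs).drop k.toNat).length < n := by
          simp only [List.length_drop]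
          omega
        rw [← ih _ hlt ((x :: xs).drop k.toNat) rfl]
        by_cases hle : k ≤ ((x :: xs).length : Int)
        · have hlen : ((((x :: xs).drop k.toNat).length : Int)) = ((x :: xs).length : Int) - k := by
            simp only [List.length_drop]
            omega
          rw [hlen]
          refine List.map_congr_left ?_
          intro i hi
          have h0i : 0 ≤ i := ((PySem.List.mem_pyRange_iff_of_pos hk i).mp hi).1
          simp only [Function.comp]
          rw [PySem.List.slice_toNat _ (by omega) (by omega),
            PySem.List.slice_toNat _ (by omega) (by omega), List.drop_drop]
          have h1 : k.toNat + i.toNat = (i + k).toNat := by omega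
          have h2 : (i + k + k).toNat - (i + k).toNat = (i + k).toNat - i.toNat := by omega
          rw [h1, h2]
        · have hd : (x :: xs).drop k.toNat = [] := by
            apply List.drop_eq_nil_of_le
            simp only [List.length_cons] at hle ⊢
            omega
          have hr1 : PySem.List.pyRange 0 (((x :: xs).length : Int) - k) k = [] := by
            rw [PySem.List.pyRange_of_pos _ _ hk, if_neg (by omega)]
            simp
          rw [hd, hr1]
          simp [PySem.List.pyRange, show k ≠ 0 by omega]

-- ===== VERDICT (by name: the statement is the Claim_ definition above) =====
theorem even_number_in_chunks_spec : Claim_equal_even_number_in_chunks := by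
  intro num k _ hk
  unfold Spec_even_number_in_chunks
  simp only [even_number_in_chunks, even_number_in_chunks_alt]
  have hall : ∀ n ∈ num.filter (fun n => PySem.Int.mod n 2 == 0), PySem.Int.mod n 2 == 0 :=
    fun n hn => (List.mem_filter.mp hn).2
  rw [foldl_stepA_filter, map_range_slice_eq_chunkB k hk _ _ rfl]
  have := loopA k hk _ hall [] [] (by simpa using hk)
  simpa using this
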